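-- pv_equiv track=rewrite | github.com/mgrainger87/GenerativeDebugging | generate_commands_table.py | create_latex_table_multi_count_escaped
-- ===== SOURCE A (Python) =====
-- def escape_latex_special_chars(text):
-- 	"""
-- 	Escape LaTeX special characters in the given text.
--
-- 	:param text: A string that might contain LaTeX special characters.
-- 	:return: A string with LaTeX special characters escaped.
-- 	"""
-- 	# Define LaTeX special characters that need escaping
-- 	special_chars = {
-- 		'_': '\\textunderscore ',
-- 		'$': '\\$',
-- 		'&': '\\&',
-- 		'%': '\\%',
-- 		'#': '\\#',
-- 		'{': '\\{',
-- 		'}': '\\}',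
-- 		'~': '\\textasciitilde{}',
-- 		'^': '\\textasciicircum{}',
-- 		'\\': '\\textbackslash{}'
-- 	}
--
-- 	# Escape special characters
-- 	for char, escaped_char in special_chars.items():
-- 		if char != '\\':  # Handle backslash separately
-- 			text = text.replace(char, escaped_char)
--
-- 	# # Escape backslashes last to avoid double escaping
-- 	# text = text.replace('\\', '\\textbackslash{}')
--
-- 	return text
--
-- def create_latex_table_multi_count_escaped(main_cmds_list, sub_cmds_list):
-- 	"""
-- 	Generate a LaTeX table with escaped special characters from the provided list of dictionaries
-- 	of main and sub commands, with multiple count columns.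
--
-- 	:param main_cmds_list: List of dictionaries of main commands and their counts.
-- 	:param sub_cmds_list: List of dictionaries of sub-commands and their counts.
-- 	:return: String representing the LaTeX table.
-- 	"""
-- 	# Combine all main and sub commands into a set for unified processing
-- 	all_main_cmds = set()
-- 	for cmds in main_cmds_list:
-- 		all_main_cmds.update(cmds.keys())
--
-- 	all_sub_cmds = set()
-- 	for cmds in sub_cmds_list:
-- 		all_sub_cmds.update(cmds.keys())
--
-- 	# Start building the LaTeX table
-- 	latex_table = "\\begin{table}\n\\centering\n\\caption{\\em LLDB Commands Requested During Debugging}\n" \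
-- 				  "\\label{tab:lldb_commands}\n\\begin{tabular}{p{0.6\\linewidth}"
-- 	latex_table += "r" * len(main_cmds_list)  # Add columns for counts
-- 	latex_table += "}\n\\toprule\nCommand"
--
-- 	# Add headers for count columns
-- 	for i in range(len(main_cmds_list)):
-- 		latex_table += f"& Count {i + 1} "
-- 	latex_table += "\\\\\n \\textit{(sub-instructions seen)} \\\\\n\\midrule\n"
--
-- 	# Process each main command
-- 	for cmd in sorted(all_main_cmds):
-- 		# Add command name
-- 		latex_table += f"\\textbf{{{escape_latex_special_chars(cmd)}}}"
--
-- 		# Add counts for each main command from each dictionary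
-- 		for main_cmds in main_cmds_list:
-- 			count = main_cmds.get(cmd, 0)
-- 			latex_table += f" & \\textbf{{{count}}}"
--
-- 		latex_table += " \\\\\n"
--
-- 		# Process sub-commands related to the main command
-- 		for sub_cmd in sorted(all_sub_cmds):
-- 			if sub_cmd.startswith(f"{cmd} "):
-- 				sub_cmd_formatted = escape_latex_special_chars(sub_cmd.replace(cmd, "").strip())
--
-- 				# Add sub-command name
-- 				latex_table += f"\\textit{{\\quad {sub_cmd_formatted}}}"
--
-- 				# Add counts for each sub-command from each dictionary
-- 				for sub_cmds in sub_cmds_list: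
-- 					sub_count = sub_cmds.get(sub_cmd, 0)
-- 					latex_table += f" & \\textit{{{sub_count}}}"
--
-- 				latex_table += " \\\\\n"
--
-- 	latex_table += "\\bottomrule\n\\end{tabular}\n\\end{table}"
--
-- 	return latex_table
-- ===== SOURCE B (Python) =====
-- def create_latex_table_multi_count_escaped(main_cmds_list, sub_cmds_list):
-- 	"""
-- 	Same LaTeX table as the original, but built in one pass: sub-commands are
-- 	indexed once by every space-delimited prefix, so each main command finds its
-- 	sub-commands by a dict lookup instead of rescanning all sub-commands.
-- 	"""
-- 	ESC = {'_': '\\textunderscore ', '$': '\\$', '&': '\\&', '%': '\\%', '#': '\\#',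
-- 	       '{': '\\{', '}': '\\}', '~': '\\textasciitilde{}', '^': '\\textasciicircum{}'}
--
-- 	def esc(text):
-- 		return ''.join(ESC.get(ch, ch) for ch in text)
--
-- 	all_main_cmds = set()
-- 	for cmds in main_cmds_list:
-- 		all_main_cmds.update(cmds.keys())
--
-- 	all_sub_cmds = set()
-- 	for cmds in sub_cmds_list:
-- 		all_sub_cmds.update(cmds.keys())
--
-- 	# Index every sub-command under each of its space-delimited prefixes,
-- 	# in sorted order, so buckets[cmd] lists exactly the sub-commands that
-- 	# start with f"{cmd} ", already sorted.
-- 	buckets = {}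
-- 	for sub in sorted(all_sub_cmds):
-- 		for i, ch in enumerate(sub):
-- 			if ch == ' ':
-- 				buckets.setdefault(sub[:i], []).append(sub)
--
-- 	parts = ["\\begin{table}\n\\centering\n\\caption{\\em LLDB Commands Requested During Debugging}\n"
-- 	         "\\label{tab:lldb_commands}\n\\begin{tabular}{p{0.6\\linewidth}",
-- 	         "r" * len(main_cmds_list),
-- 	         "}\n\\toprule\nCommand"]
-- 	for i in range(len(main_cmds_list)):
-- 		parts.append(f"& Count {i + 1} ")
-- 	parts.append("\\\\\n \\textit{(sub-instructions seen)} \\\\\n\\midrule\n")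
--
-- 	for cmd in sorted(all_main_cmds):
-- 		parts.append(f"\\textbf{{{esc(cmd)}}}")
-- 		for main_cmds in main_cmds_list:
-- 			parts.append(f" & \\textbf{{{main_cmds.get(cmd, 0)}}}")
-- 		parts.append(" \\\\\n")
-- 		for sub_cmd in buckets.get(cmd, []):
-- 			parts.append(f"\\textit{{\\quad {esc(sub_cmd.replace(cmd, '').strip())}}}")
-- 			for sub_cmds in sub_cmds_list:
-- 				parts.append(f" & \\textit{{{sub_cmds.get(sub_cmd, 0)}}}")
-- 			parts.append(" \\\\\n")
-- 	parts.append("\\bottomrule\n\\end{tabular}\n\\end{table}")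
-- 	return ''.join(parts)
-- ===== Notes on version B (the rewrite author's own statement) =====
-- stated objective: faster
-- what changed: Instead of rescanning and startswith-testing every sorted sub-command for each main command, B builds one dict indexing each sub-command under all of its space-delimited prefixes (in sorted order), so each main command's sub-rows come from a single dict lookup; the table is assembled as a joined list of parts and LaTeX escaping is done in a single character pass instead of nine sequential str.replace passes.
import Mathlib
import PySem

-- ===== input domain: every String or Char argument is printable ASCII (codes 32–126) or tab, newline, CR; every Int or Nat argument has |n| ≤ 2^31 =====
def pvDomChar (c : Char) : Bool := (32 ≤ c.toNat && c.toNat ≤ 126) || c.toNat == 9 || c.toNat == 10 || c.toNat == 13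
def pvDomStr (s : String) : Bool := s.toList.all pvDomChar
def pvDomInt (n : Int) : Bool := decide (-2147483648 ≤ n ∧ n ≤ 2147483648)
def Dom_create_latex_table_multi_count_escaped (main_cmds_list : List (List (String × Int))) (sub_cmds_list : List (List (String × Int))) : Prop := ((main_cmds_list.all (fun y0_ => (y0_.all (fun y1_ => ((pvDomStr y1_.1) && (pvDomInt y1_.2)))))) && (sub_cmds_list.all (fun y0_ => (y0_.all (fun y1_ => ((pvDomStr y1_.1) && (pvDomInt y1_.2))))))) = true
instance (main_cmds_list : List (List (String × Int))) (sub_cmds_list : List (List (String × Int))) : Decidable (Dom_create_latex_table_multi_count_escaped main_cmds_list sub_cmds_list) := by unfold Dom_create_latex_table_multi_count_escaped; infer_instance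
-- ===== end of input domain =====

-- B replaces A's per-main-command rescan of all sub-commands by a dict indexing every
-- sub-command under each of its space-delimited prefixes (built once, in sorted order),
-- and escapes in a single character pass; measured faster in a timing run.

-- ===== PORT A =====
-- A's escape helper: sequential str.replace over the special-character table (backslash entry skipped)
def escape_latex_special_chars_port (t0 : List Char) : List Char :=
  let t1 := PySem.Chars.replace t0 ['_'] "\\textunderscore ".toList
  let t2 := PySem.Chars.replace t1 ['$'] "\\$".toList
  let t3 := PySem.Chars.replace t2 ['&'] "\\&".toList
  let t4 := PySem.Chars.replace t3 ['%'] "\\%".toList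
  let t5 := PySem.Chars.replace t4 ['#'] "\\#".toList
  let t6 := PySem.Chars.replace t5 ['{'] "\\{".toList
  let t7 := PySem.Chars.replace t6 ['}'] "\\}".toList
  let t8 := PySem.Chars.replace t7 ['~'] "\\textasciitilde{}".toList
  PySem.Chars.replace t8 ['^'] "\\textasciicircum{}".toList

def create_latex_table_multi_count_escaped (main_cmds_list : List (List (String × Int))) (sub_cmds_list : List (List (String × Int))) : String :=
  let all_main_cmds : PySem.Set String :=
    main_cmds_list.foldl (fun s cmds => PySem.Set.update s (PySem.Dict.ofList cmds).keys) PySem.Set.empty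
  let all_sub_cmds : PySem.Set String :=
    sub_cmds_list.foldl (fun s cmds => PySem.Set.update s (PySem.Dict.ofList cmds).keys) PySem.Set.empty
  let t1 := "\\begin{table}\n\\centering\n\\caption{\\em LLDB Commands Requested During Debugging}\n\\label{tab:lldb_commands}\n\\begin{tabular}{p{0.6\\linewidth}".toList
  let t2 := t1 ++ List.replicate main_cmds_list.length 'r'   -- "r" * len(main_cmds_list)
  let t3 := t2 ++ "}\n\\toprule\nCommand".toList
  let t4 := (PySem.List.pyRange 0 main_cmds_list.length 1).foldl
      (fun t i => t ++ "& Count ".toList ++ PySem.Int.toChars (i + 1) ++ " ".toList) t3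
  let t5 := t4 ++ "\\\\\n \\textit{(sub-instructions seen)} \\\\\n\\midrule\n".toList
  let t6 := (PySem.List.sorted all_main_cmds (fun x => x) false).foldl (fun t cmd =>
      let t := t ++ "\\textbf{".toList ++ escape_latex_special_chars_port cmd.toList ++ "}".toList
      let t := main_cmds_list.foldl (fun t main_cmds =>
          t ++ " & \\textbf{".toList
            ++ PySem.Int.toChars ((PySem.Dict.ofList main_cmds).getD cmd 0) ++ "}".toList) t
      let t := t ++ " \\\\\n".toList
      (PySem.List.sorted all_sub_cmds (fun x => x) false).foldl (fun t sub_cmd =>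
        if PySem.Chars.startswith sub_cmd.toList (cmd.toList ++ [' ']) then
          let t := t ++ "\\textit{\\quad ".toList
              ++ escape_latex_special_chars_port
                   (PySem.Chars.strip (PySem.Chars.replace sub_cmd.toList cmd.toList []))
              ++ "}".toList
          let t := sub_cmds_list.foldl (fun t sub_cmds =>
              t ++ " & \\textit{".toList
                ++ PySem.Int.toChars ((PySem.Dict.ofList sub_cmds).getD sub_cmd 0) ++ "}".toList) t
          t ++ " \\\\\n".toList
        else t) t) t5
  String.ofList (t6 ++ "\\bottomrule\n\\end{tabular}\n\\end{table}".toList)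

-- ===== PORT B =====
-- B's escape table: ESC.get(ch, ch) on the literal dict (distinct keys, so first-match if-chain is exact)
def pvEscChar (c : Char) : List Char :=
  if c = '_' then "\\textunderscore ".toList
  else if c = '$' then "\\$".toList
  else if c = '&' then "\\&".toList
  else if c = '%' then "\\%".toList
  else if c = '#' then "\\#".toList
  else if c = '{' then "\\{".toList
  else if c = '}' then "\\}".toList
  else if c = '~' then "\\textasciitilde{}".toList
  else if c = '^' then "\\textasciicircum{}".toList
  else [c]

-- B's esc: ''.join(ESC.get(ch, ch) for ch in text)
def pvEsc (t : List Char) : List Char := t.flatMap pvEscChar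

def create_latex_table_multi_count_escaped_alt (main_cmds_list : List (List (String × Int))) (sub_cmds_list : List (List (String × Int))) : String :=
  let all_main_cmds : PySem.Set String :=
    main_cmds_list.foldl (fun s cmds => PySem.Set.update s (PySem.Dict.ofList cmds).keys) PySem.Set.empty
  let all_sub_cmds : PySem.Set String :=
    sub_cmds_list.foldl (fun s cmds => PySem.Set.update s (PySem.Dict.ofList cmds).keys) PySem.Set.empty
  let sorted_subs := PySem.List.sorted all_sub_cmds (fun x => x) false
  -- buckets: every sub-command filed under each of its space-delimited prefixes
  let buckets : PySem.Dict String (List String) :=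
    sorted_subs.foldl (fun d sub =>
      (PySem.List.enumerate sub.toList).foldl (fun d p =>
        if p.2 = ' ' then
          let key := String.ofList (PySem.Chars.slice sub.toList none (some p.1))   -- sub[:i]
          d.insert key (d.getD key [] ++ [sub])                                 -- setdefault(...).append(sub)
        else d) d) PySem.Dict.empty
  let parts : List (List Char) :=
    ["\\begin{table}\n\\centering\n\\caption{\\em LLDB Commands Requested During Debugging}\n\\label{tab:lldb_commands}\n\\begin{tabular}{p{0.6\\linewidth}".toList,
     List.replicate main_cmds_list.length 'r',
     "}\n\\toprule\nCommand".toList]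
  let parts := (PySem.List.pyRange 0 main_cmds_list.length 1).foldl
      (fun ps i => ps ++ ["& Count ".toList ++ PySem.Int.toChars (i + 1) ++ " ".toList]) parts
  let parts := parts ++ ["\\\\\n \\textit{(sub-instructions seen)} \\\\\n\\midrule\n".toList]
  let parts := (PySem.List.sorted all_main_cmds (fun x => x) false).foldl (fun ps cmd =>
      let ps := ps ++ ["\\textbf{".toList ++ pvEsc cmd.toList ++ "}".toList]
      let ps := main_cmds_list.foldl (fun ps main_cmds =>
          ps ++ [" & \\textbf{".toList
            ++ PySem.Int.toChars ((PySem.Dict.ofList main_cmds).getD cmd 0) ++ "}".toList]) ps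
      let ps := ps ++ [" \\\\\n".toList]
      (buckets.getD cmd []).foldl (fun ps sub_cmd =>
        let ps := ps ++ ["\\textit{\\quad ".toList
            ++ pvEsc (PySem.Chars.strip (PySem.Chars.replace sub_cmd.toList cmd.toList []))
            ++ "}".toList]
        let ps := sub_cmds_list.foldl (fun ps sub_cmds =>
            ps ++ [" & \\textit{".toList
              ++ PySem.Int.toChars ((PySem.Dict.ofList sub_cmds).getD sub_cmd 0) ++ "}".toList]) ps
        ps ++ [" \\\\\n".toList]) ps) parts
  let parts := parts ++ ["\\bottomrule\n\\end{tabular}\n\\end{table}".toList]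
  String.ofList parts.flatten


-- ===== PRECONDITION & SPEC =====
def Spec_create_latex_table_multi_count_escaped (main_cmds_list : List (List (String × Int))) (sub_cmds_list : List (List (String × Int))) (out : String) : Prop := out = create_latex_table_multi_count_escaped_alt main_cmds_list sub_cmds_list
instance (main_cmds_list : List (List (String × Int))) (sub_cmds_list : List (List (String × Int))) (out : String) : Decidable (Spec_create_latex_table_multi_count_escaped main_cmds_list sub_cmds_list out) := by unfold Spec_create_latex_table_multi_count_escaped; infer_instance

-- ===== CLAIM =====
def Claim_equal_create_latex_table_multi_count_escaped : Prop := ∀ (main_cmds_list : List (List (String × Int))) (sub_cmds_list : List (List (String × Int))), Dom_create_latex_table_multi_count_escaped main_cmds_list sub_cmds_list → Spec_create_latex_table_multi_count_escaped main_cmds_list sub_cmds_list (create_latex_table_multi_count_escaped main_cmds_list sub_cmds_list)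

-- ===== LEMMAS AND PROOFS =====


lemma go_single (o : Char) (new : List Char) :
    ∀ (fuel : Nat) (l acc : List Char), l.length ≤ fuel →
      PySem.Chars.replace.go [o] new fuel l acc
        = acc.reverse ++ l.flatMap (fun c => if c = o then new else [c]) := by
  intro fuel
  induction fuel with
  | zero => intro l acc h; rw [PySem.Chars.replace.go.eq_def]; cases l <;> simp_all
  | succ n ih =>
    intro l acc h
    cases l with
    | nil => rw [PySem.Chars.replace.go.eq_def]; simp
    | cons c t =>
      have hpre : [o].isPrefixOf (c :: t) = (o == c) := by simp [List.isPrefixOf]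
      rw [PySem.Chars.replace.go.eq_def]
      simp only [List.length_cons] at h
      by_cases hc : c = o
      · subst hc
        simp only [hpre, BEq.rfl, if_pos, List.length_cons, List.drop_succ_cons,
          List.length_nil, List.drop_zero]
        rw [ih _ _ (Nat.le_of_succ_le_succ h)]
        simp
      · have hpre' : [o].isPrefixOf (c :: t) = false := by rw [hpre]; simp [Ne.symm hc]
        simp only [hpre', Bool.false_eq_true, if_false]
        rw [ih _ _ (Nat.le_of_succ_le_succ h)]
        simp [hc]

lemma replace_single (s : List Char) (o : Char) (new : List Char) :
    PySem.Chars.replace s [o] new = s.flatMap (fun c => if c = o then new else [c]) := by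
  rw [PySem.Chars.replace]
  simp only [List.isEmpty_cons]
  exact (go_single o new s.length s [] le_rfl).trans (by simp)

lemma esc_eq (t : List Char) : escape_latex_special_chars_port t = pvEsc t := by
  simp only [escape_latex_special_chars_port, replace_single, List.flatMap_assoc, pvEsc]
  suffices h : ∀ c, ((fun c => if c = '_' then "\\textunderscore ".toList else [c]) c).flatMap
      (fun c => (if c = '$' then "\\$".toList else [c]).flatMap
      (fun c => (if c = '&' then "\\&".toList else [c]).flatMap
      (fun c => (if c = '%' then "\\%".toList else [c]).flatMap
      (fun c => (if c = '#' then "\\#".toList else [c]).flatMap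
      (fun c => (if c = '{' then "\\{".toList else [c]).flatMap
      (fun c => (if c = '}' then "\\}".toList else [c]).flatMap
      (fun c => (if c = '~' then "\\textasciitilde{}".toList else [c]).flatMap
      (fun c => if c = '^' then "\\textasciicircum{}".toList else [c])))))))) = pvEscChar c by
    exact by rw [funext h]
  intro c
  by_cases h1 : c = '_'; · subst h1; decide
  by_cases h2 : c = '$'; · subst h2; decide
  by_cases h3 : c = '&'; · subst h3; decide
  by_cases h4 : c = '%'; · subst h4; decide
  by_cases h5 : c = '#'; · subst h5; decide
  by_cases h6 : c = '{'; · subst h6; decide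
  by_cases h7 : c = '}'; · subst h7; decide
  by_cases h8 : c = '~'; · subst h8; decide
  by_cases h9 : c = '^'; · subst h9; decide
  simp [pvEscChar, h1, h2, h3, h4, h5, h6, h7, h8, h9]

lemma pvPointwise (s cl : List Char) (k : Nat) (hk : k < s.length) :
    ((PySem.List.pyGetD s (k : Int) ' ' == ' ')
      && (String.ofList (PySem.Chars.slice s none (some (k : Int))) == String.ofList cl))
    = ((k == cl.length) && PySem.Chars.startswith s (cl ++ [' '])) := by
  have hslice : PySem.Chars.slice s none (some (k : Int)) = s.take k := by
    rw [PySem.Chars.slice_eq_listSlice, PySem.List.slice_to s (by positivity)]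
    simp
  have hget : PySem.List.pyGetD s (k : Int) ' ' = s[k] := by
    rw [PySem.List.pyGetD_natCast, List.getD_eq_getElem s ' ' hk]
  have hofl : (String.ofList (s.take k) == String.ofList cl) = (decide (s.take k = cl)) := by
    by_cases h : s.take k = cl
    · simp [h]
    · simp [h]
      intro he
      exact absurd (by rw [← String.toList_ofList (l := s.take k), he, String.toList_ofList]) h
  rw [hslice, hget, hofl]
  by_cases hc2 : s.take k = cl
  · have hlen : cl.length = k := by rw [← hc2, List.length_take]; omega
    have hW : PySem.Chars.startswith s (cl ++ [' ']) = (s[k] == ' ') := by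
      by_cases hsp : s[k] = ' '
      · simp only [hsp, BEq.rfl]
        rw [(PySem.Chars.startswith_iff _ _).mpr]
        rw [List.prefix_iff_eq_take]
        rw [List.length_append, hlen, List.length_singleton, List.take_add_one]
        rw [← hc2, List.getElem?_eq_getElem hk, hsp]
        rfl
      · have : ¬ PySem.Chars.startswith s (cl ++ [' ']) = true := by
          rw [PySem.Chars.startswith_iff, List.prefix_iff_eq_take, List.length_append,
            hlen, List.length_singleton, List.take_add_one, ← hc2, List.getElem?_eq_getElem hk]
          intro h
          have := List.append_inj_right h (by simp)
          simp at this
          exact hsp this.symm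
        simp only [Bool.not_eq_true] at this
        rw [this]
        simp [hsp]
    rw [hW, hlen]
    simp [hc2]
  · simp only [hc2, decide_false, Bool.and_false, Bool.false_eq]
    by_cases hkl : k = cl.length
    · subst hkl
      have : ¬ PySem.Chars.startswith s (cl ++ [' ']) = true := by
        rw [PySem.Chars.startswith_iff, List.prefix_iff_eq_take, List.length_append,
          List.length_singleton, List.take_add_one]
        intro h
        exact hc2 (List.append_inj_left h (by simp [List.length_take]; omega)).symm
      simp only [Bool.not_eq_true] at this
      simp [this]
    · simp [hkl]

lemma pvEnumFilter (sub c : String) :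
    (List.map (fun (_ : Int × Char) => sub)
      (List.filter (fun p => (p.2 == ' ')
          && (String.ofList (PySem.Chars.slice sub.toList none (some p.1)) == c))
        (PySem.List.enumerate sub.toList)))
    = (if PySem.Chars.startswith sub.toList (c.toList ++ [' ']) then [sub] else []) := by
  rw [PySem.List.enumerate_eq_map_pyRange sub.toList ' ']
  have hlen : PySem.List.len sub.toList = ((sub.toList.length : Nat) : Int) := by
    simp [PySem.List.len]
  rw [hlen, PySem.List.pyRange_zero_natCast, List.map_map, List.filter_map, List.map_map]
  have hpt : ∀ k ∈ List.range sub.toList.length,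
      ((fun p : Int × Char => (p.2 == ' ')
          && (String.ofList (PySem.Chars.slice sub.toList none (some p.1)) == c))
        ∘ ((fun j => (j, PySem.List.pyGetD sub.toList j ' ')) ∘ (fun (k : Nat) => (k : Int)))) k
      = ((k == c.toList.length) && PySem.Chars.startswith sub.toList (c.toList ++ [' '])) := by
    intro k hkm
    rw [List.mem_range] at hkm
    simp only [Function.comp_apply]
    have h := pvPointwise sub.toList c.toList k hkm
    rw [String.ofList_toList] at h
    exact h
  rw [List.filter_congr hpt]
  by_cases hW : PySem.Chars.startswith sub.toList (c.toList ++ [' ']) = true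
  · have hlt : c.toList.length < sub.toList.length := by
      have := PySem.Chars.startswith_iff _ _ |>.mp hW
      have h2 := this.length_le
      simp only [List.length_append, List.length_cons, List.length_nil] at h2
      omega
    simp only [hW, Bool.and_true]
    rw [List.filter_beq, List.count_range]
    have hlt' : c.length < sub.length := by simpa using hlt
    simp [hlt']
  · simp only [Bool.not_eq_true] at hW
    simp only [hW, Bool.and_false]
    simp


-- step of B's bucket-building inner loop, for a fixed sub
def pvBStep (sub : String) (d : PySem.Dict String (List String)) : PySem.Dict String (List String) :=
  (PySem.List.enumerate sub.toList).foldl (fun d p =>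
    if p.2 = ' ' then
      let key := String.ofList (PySem.Chars.slice sub.toList none (some p.1))
      d.insert key (d.getD key [] ++ [sub])
    else d) d

lemma pvBStep_getD (sub c : String) (d : PySem.Dict String (List String)) :
    (pvBStep sub d).getD c []
      = d.getD c [] ++ (if PySem.Chars.startswith sub.toList (c.toList ++ [' ']) then [sub] else []) := by
  have G : ∀ (es : List (Int × Char)) (d : PySem.Dict String (List String)),
      ((es.foldl (fun d p =>
        if p.2 = ' ' then
          let key := String.ofList (PySem.Chars.slice sub.toList none (some p.1))
          d.insert key (d.getD key [] ++ [sub])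
        else d) d).getD c [])
        = d.getD c [] ++ ((es.filter (fun p => (p.2 == ' ')
              && (String.ofList (PySem.Chars.slice sub.toList none (some p.1)) == c))).map (fun _ => sub)) := by
    intro es
    induction es with
    | nil => intro d; simp
    | cons p es ih =>
      intro d
      by_cases hsp : p.2 = ' '
      · by_cases hk : String.ofList (PySem.Chars.slice sub.toList none (some p.1)) = c
        · have hcond : ((p.2 == ' ') && (String.ofList (PySem.Chars.slice sub.toList none (some p.1)) == c)) = true := by
            simp only [PySem.Chars.slice_eq_listSlice] at hk ⊢; simp [hsp, hk]
          simp only [List.foldl_cons, if_pos hsp, ih, List.filter_cons, hcond, if_pos, List.map_cons]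
          rw [hk, PySem.Dict.getD_insert_self]
          simp
        · have hcond : ((p.2 == ' ') && (String.ofList (PySem.Chars.slice sub.toList none (some p.1)) == c)) = false := by
            simp only [PySem.Chars.slice_eq_listSlice] at hk ⊢; simp [hk]
          simp only [List.foldl_cons, if_pos hsp, ih, List.filter_cons, hcond, Bool.false_eq_true, if_false]
          rw [PySem.Dict.getD_insert_of_ne _ _ _ (Ne.symm hk)]
      · have hcond : ((p.2 == ' ') && (String.ofList (PySem.Chars.slice sub.toList none (some p.1)) == c)) = false := by
          simp [hsp]
        simp only [List.foldl_cons, if_neg hsp, ih, List.filter_cons, hcond, Bool.false_eq_true, if_false]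
  rw [pvBStep, G]
  congr 1
  rw [pvEnumFilter]

-- canonical building blocks shared by the two collapsing lemmas
def pvP (cmd sub : String) : Bool := PySem.Chars.startswith sub.toList (cmd.toList ++ [' '])

def pvKeySet (l : List (List (String × Int))) : PySem.Set String :=
  l.foldl (fun s cmds => PySem.Set.update s (PySem.Dict.ofList cmds).keys) PySem.Set.empty

def pvMains (M : List (List (String × Int))) : List String :=
  PySem.List.sorted (pvKeySet M) (fun x => x) false

def pvSubs (S : List (List (String × Int))) : List String :=
  PySem.List.sorted (pvKeySet S) (fun x => x) false

def pvHdr (M : List (List (String × Int))) : List Char :=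
  "\\begin{table}\n\\centering\n\\caption{\\em LLDB Commands Requested During Debugging}\n\\label{tab:lldb_commands}\n\\begin{tabular}{p{0.6\\linewidth}".toList
  ++ List.replicate M.length 'r' ++ "}\n\\toprule\nCommand".toList
  ++ (PySem.List.pyRange 0 M.length 1).flatMap
       (fun i => "& Count ".toList ++ PySem.Int.toChars (i + 1) ++ " ".toList)
  ++ "\\\\\n \\textit{(sub-instructions seen)} \\\\\n\\midrule\n".toList

def pvCountsMain (M : List (List (String × Int))) (cmd : String) : List Char :=
  M.flatMap (fun mc => " & \\textbf{".toList ++ PySem.Int.toChars ((PySem.Dict.ofList mc).getD cmd 0) ++ "}".toList)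

def pvSubRow (S : List (List (String × Int))) (cmd sub : String) : List Char :=
  "\\textit{\\quad ".toList
  ++ pvEsc (PySem.Chars.strip (PySem.Chars.replace sub.toList cmd.toList [])) ++ "}".toList
  ++ S.flatMap (fun sc => " & \\textit{".toList ++ PySem.Int.toChars ((PySem.Dict.ofList sc).getD sub 0) ++ "}".toList)
  ++ " \\\\\n".toList

def pvRow (M S : List (List (String × Int))) (cmd : String) : List Char :=
  "\\textbf{".toList ++ pvEsc cmd.toList ++ "}".toList
  ++ pvCountsMain M cmd ++ " \\\\\n".toList
  ++ ((pvSubs S).filter (pvP cmd)).flatMap (pvSubRow S cmd)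

def pvTail : List Char := "\\bottomrule\n\\end{tabular}\n\\end{table}".toList

lemma foldl_if_append {a b : Type} (p : a -> Bool) (g : a -> List b) :
    forall (l : List a) (t : List b),
      l.foldl (fun t x => if p x then t ++ g x else t) t = t ++ (l.filter p).flatMap g := by
  intro l
  induction l with
  | nil => intro t; simp
  | cons x l ih =>
    intro t
    by_cases hp : p x
    · simp [hp, ih]
    · simp [hp, ih]

lemma pvFoldlBStep (c : String) :
    forall (l : List String) (d : PySem.Dict String (List String)),
      ((l.foldl (fun d sub => pvBStep sub d) d).getD c [])
        = d.getD c [] ++ l.filter (fun sub => PySem.Chars.startswith sub.toList (c.toList ++ [' '])) := by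
  intro l
  induction l with
  | nil => intro d; simp
  | cons sub l ih =>
    intro d
    rw [List.foldl_cons, ih, pvBStep_getD, List.filter_cons]
    by_cases hp : PySem.Chars.startswith sub.toList (c.toList ++ [' ']) = true
    · simp [hp]
    · simp only [Bool.not_eq_true] at hp
      simp [hp]

lemma pvA_eq (M S : List (List (String × Int))) :
    create_latex_table_multi_count_escaped M S
      = String.ofList (pvHdr M ++ (pvMains M).flatMap (pvRow M S) ++ pvTail) := by
  unfold create_latex_table_multi_count_escaped
  refine congrArg String.ofList ?_
  rw [PySem.List.foldl_congr_mem _ _ (fun (t : List Char) cmd => t ++ pvRow M S cmd) _ ?hstep]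
  case hstep =>
    intro t cmd _
    simp only [List.append_assoc, PySem.List.foldl_append_eq_flatMap, foldl_if_append, esc_eq]
    simp [pvRow, pvCountsMain, pvSubs, pvKeySet, List.append_assoc]
    congr 1
    funext sub
    simp [pvSubRow, List.append_assoc]
  simp only [PySem.List.foldl_append_eq_flatMap, List.append_assoc]
  simp [pvHdr, pvMains, pvKeySet, pvTail, List.append_assoc]

def pvSubParts (S : List (List (String × Int))) (cmd sub : String) : List (List Char) :=
  ["\\textit{\\quad ".toList
     ++ pvEsc (PySem.Chars.strip (PySem.Chars.replace sub.toList cmd.toList [])) ++ "}".toList]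
  ++ S.map (fun sc => " & \\textit{".toList ++ PySem.Int.toChars ((PySem.Dict.ofList sc).getD sub 0) ++ "}".toList)
  ++ [" \\\\\n".toList]

def pvRowParts (M S : List (List (String × Int))) (cmd : String) : List (List Char) :=
  ["\\textbf{".toList ++ pvEsc cmd.toList ++ "}".toList]
  ++ M.map (fun mc => " & \\textbf{".toList ++ PySem.Int.toChars ((PySem.Dict.ofList mc).getD cmd 0) ++ "}".toList)
  ++ [" \\\\\n".toList]
  ++ ((pvSubs S).filter (pvP cmd)).flatMap (pvSubParts S cmd)

lemma flatten_flatMap {a b : Type} (l : List a) (f : a -> List (List b)) :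
    (l.flatMap f).flatten = l.flatMap (fun x => (f x).flatten) := by
  induction l with
  | nil => simp
  | cons x l ih => simp [ih]

lemma pvRowParts_flatten (M S : List (List (String × Int))) (cmd : String) :
    (pvRowParts M S cmd).flatten = pvRow M S cmd := by
  simp [pvRowParts, pvRow, pvCountsMain, List.flatten_append, flatten_flatMap,
    ← List.flatMap_def, List.append_assoc]
  refine congrFun (congrArg List.flatMap (funext fun sub => ?_)) _
  simp [pvSubParts, pvSubRow, ← List.flatMap_def, List.append_assoc]

set_option maxRecDepth 8192 in
lemma pvB_eq (M S : List (List (String × Int))) :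
    create_latex_table_multi_count_escaped_alt M S
      = String.ofList (pvHdr M ++ (pvMains M).flatMap (pvRow M S) ++ pvTail) := by
  unfold create_latex_table_multi_count_escaped_alt
  refine congrArg String.ofList ?_
  rw [PySem.List.foldl_congr_mem _ _ (fun (ps : List (List Char)) cmd => ps ++ pvRowParts M S cmd) _ ?hstep]
  case hstep =>
    intro ps cmd _
    have hbuck :
        ((PySem.List.sorted
            (List.foldl (fun s cmds => PySem.Set.update s (PySem.Dict.ofList cmds).keys) PySem.Set.empty S)
            (fun x => x) false).foldl
          (fun d sub =>
            (PySem.List.enumerate sub.toList).foldl (fun d p =>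
              if p.2 = ' ' then
                let key := String.ofList (PySem.Chars.slice sub.toList none (some p.1))
                d.insert key (d.getD key [] ++ [sub])
              else d) d) PySem.Dict.empty).getD cmd []
          = (pvSubs S).filter (pvP cmd) := by
      show ((pvSubs S).foldl (fun d sub => pvBStep sub d) PySem.Dict.empty).getD cmd []
        = (pvSubs S).filter (pvP cmd)
      rw [pvFoldlBStep]
      simp only [PySem.Dict.getD, PySem.Dict.empty]
      congr 1
    rw [hbuck]
    simp only [List.append_assoc, PySem.List.foldl_append_singleton_eq_map,
      PySem.List.foldl_append_eq_flatMap]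
    simp [pvRowParts, List.append_assoc]
    refine congrFun (congrArg List.flatMap (funext fun sub => ?_)) _
    simp [pvSubParts]
  simp only [PySem.List.foldl_append_singleton_eq_map, List.append_assoc]
  simp [List.flatten_append, flatten_flatMap, pvRowParts_flatten, pvHdr, pvMains, pvKeySet,
    pvTail, ← List.flatMap_def, List.append_assoc]

-- ===== VERDICT =====
theorem create_latex_table_multi_count_escaped_spec : Claim_equal_create_latex_table_multi_count_escaped := by
  intro M S _
  unfold Spec_create_latex_table_multi_count_escaped
  rw [pvA_eq, pvB_eq]
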